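-- pv_equiv track=rewrite | github.com/Zaharazov/NumMethods | Lab3/3.3.py | normal_system1
-- ===== SOURCE A (Python) =====
-- def normal_system1(x, y):
--     n = len(x)
--     sum_x = sum(x)
--     sum_x2 = sum(xi**2 for xi in x)
--     sum_y = sum(y)
--     sum_xy = sum(x[i]*y[i] for i in range(n))
--
--     A = [
--         [n,      sum_x],
--         [sum_x,  sum_x2]
--     ]
--     b = [sum_y, sum_xy]
--     return A, b
-- ===== SOURCE B (Python) =====
-- def normal_system1(x, y):
--     # Gram-matrix formulation: build the design matrix X = [[1, x_i]], take its
--     # columns, and form A = X^T X as the 2x2 Gram matrix of the columns;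
--     # b = [sum(y), <second column, y>].
--     X = [[1, xi] for xi in x]
--     cols = [[row[j] for row in X] for j in range(2)]
--
--     def dot(u, v):
--         return sum(a * b for a, b in zip(u, v))
--
--     A = [[dot(cols[i], cols[k]) for k in range(2)] for i in range(2)]
--     b = [sum(y), dot(cols[1], y)]
--     return A, b
-- ===== Notes on version B (the rewrite author's own statement) =====
-- stated objective: alternative
-- what changed: B reformulates the task as linear algebra: it builds the design matrix X = [[1, x_i]], extracts its two columns, and computes A as the 2x2 Gram matrix X^T X via a generic dot product and b[1] as the dot of the second column with y, instead of A's four explicit sum formulas.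
import Mathlib
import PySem

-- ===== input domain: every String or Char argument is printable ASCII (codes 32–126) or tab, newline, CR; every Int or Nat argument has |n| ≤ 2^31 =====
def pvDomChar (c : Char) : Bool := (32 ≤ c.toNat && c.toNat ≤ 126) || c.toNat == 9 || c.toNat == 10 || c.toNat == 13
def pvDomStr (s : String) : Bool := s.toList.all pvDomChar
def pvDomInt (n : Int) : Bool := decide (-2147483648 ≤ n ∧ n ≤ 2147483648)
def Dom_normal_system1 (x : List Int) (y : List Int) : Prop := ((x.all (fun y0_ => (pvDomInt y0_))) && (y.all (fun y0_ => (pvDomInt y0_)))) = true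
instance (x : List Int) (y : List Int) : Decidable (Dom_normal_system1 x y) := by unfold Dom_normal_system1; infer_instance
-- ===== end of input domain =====

-- B reformulates the task as linear algebra (design matrix X = [[1, x_i]], A = Gram matrix XᵀX,
-- b[1] = ⟨second column, y⟩) instead of A's four explicit sum formulas.

-- ===== PORT A =====
-- sum(…) is foldl (+) 0; x[i]/y[i] are in range for every i in range(n) inside Pre_, so pyGetD's default is unreachable there
def normal_system1 (x : List Int) (y : List Int) : List (List Int) × List Int :=
  let n : Int := x.length
  let sum_x : Int := x.foldl (· + ·) 0
  let sum_x2 : Int := x.foldl (fun a xi => a + xi ^ 2) 0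
  let sum_y : Int := y.foldl (· + ·) 0
  let sum_xy : Int := (PySem.List.pyRange 0 n 1).foldl
    (fun acc i => acc + (PySem.List.pyGetD x i 0) * (PySem.List.pyGetD y i 0)) 0
  ([[n, sum_x], [sum_x, sum_x2]], [sum_y, sum_xy])

-- ===== PORT B =====
-- dot(u, v) = sum(a*b for a, b in zip(u, v))
def pvDot (u v : List Int) : Int := (u.zip v).foldl (fun s p => s + p.1 * p.2) 0

-- row[j]/cols[i] are in range (rows of X have length 2, cols has length 2), so pyGetD's default is unreachable
def normal_system1_alt (x : List Int) (y : List Int) : List (List Int) × List Int :=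
  let X : List (List Int) := x.map (fun xi => [1, xi])
  let cols : List (List Int) :=
    (PySem.List.pyRange 0 2 1).map (fun j => X.map (fun row => PySem.List.pyGetD row j 0))
  let A : List (List Int) :=
    (PySem.List.pyRange 0 2 1).map (fun i =>
      (PySem.List.pyRange 0 2 1).map (fun k =>
        pvDot (PySem.List.pyGetD cols i []) (PySem.List.pyGetD cols k [])))
  let b : List Int := [y.foldl (· + ·) 0, pvDot (PySem.List.pyGetD cols 1 []) y]
  (A, b)

-- ===== PRECONDITION & SPEC =====
-- Pre_ excludes exactly the inputs where A raises IndexError: y shorter than x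
def Pre_normal_system1 (x : List Int) (y : List Int) : Prop := x.length ≤ y.length
instance (x : List Int) (y : List Int) : Decidable (Pre_normal_system1 x y) := by unfold Pre_normal_system1; infer_instance
def pvWitness_normal_system1 : List Int × List Int := ([1, 2], [3, 4])

def Spec_normal_system1 (x : List Int) (y : List Int) (out : List (List Int) × List Int) : Prop := out = normal_system1_alt x y
instance (x : List Int) (y : List Int) (out : List (List Int) × List Int) : Decidable (Spec_normal_system1 x y out) := by unfold Spec_normal_system1; infer_instance

-- ===== CLAIM (what is proved, stated in full; the proofs are below) =====
def Claim_equal_normal_system1 : Prop := ∀ (x : List Int) (y : List Int), Dom_normal_system1 x y → Pre_normal_system1 x y → Spec_normal_system1 x y (normal_system1 x y)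

-- ===== LEMMAS AND PROOFS =====

-- B's columns are concretely the all-ones column and x itself
lemma cols_eval (x : List Int) :
    (PySem.List.pyRange 0 2 1).map
      (fun j => (x.map (fun xi => [(1 : Int), xi])).map (fun row => PySem.List.pyGetD row j 0))
    = [x.map (fun _ => (1 : Int)), x] := by
  have h : PySem.List.pyRange 0 2 1 = [0, 1] := by decide
  have h0 : ∀ xi : Int, PySem.List.pyGetD [1, xi] (0 : Int) 0 = 1 := fun xi => rfl
  have h1 : ∀ xi : Int, PySem.List.pyGetD [1, xi] (1 : Int) 0 = xi := fun xi => rfl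
  simp [h, List.map_map, Function.comp_def, h0, h1]

lemma dot_map_map (x : List Int) (f g : Int → Int) :
    pvDot (x.map f) (x.map g) = x.foldl (fun s a => s + f a * g a) 0 := by
  simp [pvDot, List.zip_map', List.foldl_map]

lemma dot_ones_ones (x : List Int) :
    pvDot (x.map (fun _ => (1 : Int))) (x.map (fun _ => (1 : Int))) = (x.length : Int) := by
  rw [dot_map_map]
  have H : ∀ (l : List Int) (c : Int), l.foldl (fun s (_ : Int) => s + 1 * 1) c = c + l.length := by
    intro l
    induction l with
    | nil => intro c; simp
    | cons a t ih => intro c; rw [List.foldl_cons, ih]; push_cast [List.length_cons]; ring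
  simpa using H x 0

lemma dot_ones_x (x : List Int) :
    pvDot (x.map (fun _ => (1 : Int))) x = x.foldl (· + ·) 0 := by
  have := dot_map_map x (fun _ => 1) id
  simpa using this

lemma dot_x_ones (x : List Int) :
    pvDot x (x.map (fun _ => (1 : Int))) = x.foldl (· + ·) 0 := by
  have := dot_map_map x id (fun _ => 1)
  simpa using this

lemma dot_x_x (x : List Int) :
    pvDot x x = x.foldl (fun a xi => a + xi ^ 2) 0 := by
  have := dot_map_map x id id
  simp only [List.map_id] at this
  rw [this]
  congr 1
  funext a xi
  simp only [id_eq]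
  ring

-- A's indexed sum over range(n) is B's dot of x with y when y is long enough
lemma sumxy_eq (x y : List Int) (h : x.length ≤ y.length) :
    (PySem.List.pyRange 0 (x.length : Int) 1).foldl
      (fun acc i => acc + (PySem.List.pyGetD x i 0) * (PySem.List.pyGetD y i 0)) 0
      = pvDot x y := by
  have hlen : (x.zip y).length = x.length := by
    simp [List.length_zip, Nat.min_eq_left h]
  have hcongr :
      (PySem.List.pyRange 0 (x.length : Int) 1).foldl
        (fun acc i => acc + (PySem.List.pyGetD x i 0) * (PySem.List.pyGetD y i 0)) 0
      = (PySem.List.pyRange 0 ((x.zip y).length : Int) 1).foldl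
        (fun acc i => acc + (PySem.List.pyGetD (x.zip y) i (0, 0)).1 * (PySem.List.pyGetD (x.zip y) i (0, 0)).2) 0 := by
    rw [hlen]
    refine PySem.List.foldl_congr_mem _ _ _ _ (fun acc i hi => ?_)
    have hmem := (PySem.List.mem_pyRange_one.mp hi)
    have h0 : 0 ≤ i := hmem.1
    have hilt : i.toNat < x.length := by omega
    have hilt' : i.toNat < (x.zip y).length := by omega
    have hylt : i.toNat < y.length := by omega
    rw [PySem.List.pyGetD_eq_getElem x 0 h0 (by exact_mod_cast (by omega : i < (x.length : Int))),
        PySem.List.pyGetD_eq_getElem y 0 h0 (by exact_mod_cast (by omega : i < (y.length : Int))),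
        PySem.List.pyGetD_eq_getElem (x.zip y) (0, 0) h0 (by exact_mod_cast (by omega : i < ((x.zip y).length : Int)))]
    simp [List.getElem_zip]
  rw [hcongr, PySem.List.foldl_pyRange_zero_pyGetD' (x.zip y) (0, 0)
        (fun acc p => acc + p.1 * p.2) 0]
  rfl

-- ===== VERDICT (by name: the statement is the Claim_ definition above) =====
theorem normal_system1_spec : Claim_equal_normal_system1 := by
  intro x y _ hpre
  unfold Spec_normal_system1
  simp only [normal_system1, normal_system1_alt]
  rw [cols_eval]
  have hrange : PySem.List.pyRange 0 2 1 = [0, 1] := by decide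
  have g0 : PySem.List.pyGetD [x.map (fun _ => (1 : Int)), x] (0 : Int) [] = x.map (fun _ => (1 : Int)) := rfl
  have g1 : PySem.List.pyGetD [x.map (fun _ => (1 : Int)), x] (1 : Int) [] = x := rfl
  simp only [hrange, List.map_cons, List.map_nil, g0, g1]
  rw [dot_ones_ones, dot_ones_x, dot_x_ones, dot_x_x, sumxy_eq x y hpre]
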